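-- pv_equiv track=rewrite | github.com/BuiltByMeT/fit-factory-scraper-public | shortenCapacity.py | withoutMaxCapacity
-- ===== SOURCE A (Python) =====
-- def withoutMaxCapacity (line):
-- 	letterIteration = 0
-- 	firstSpace = 0
-- 	whichComma = 0
-- 	secondComma = 0
-- 	# want 1st char after 2nd comma to 1st space
-- 	for letter in line:
-- 		if (letter == ","):
-- 			whichComma += 1
-- 		# grab the index of where to start (1st after 2nd comma)
-- 		if (whichComma == 2 and secondComma == 0):
-- 			secondComma = letterIteration + 1
-- 		# grab the index of where to end (1st space)
-- 		elif (whichComma == 2 and letter == " "):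
-- 			firstSpace = letterIteration
-- 			break
-- 		letterIteration += 1
--
-- 	shortCapacity = line[secondComma:firstSpace]
-- 	newLine = line[:secondComma] + shortCapacity + "\n"
--
-- 	return newLine
-- ===== SOURCE B (Python) =====
-- def withoutMaxCapacity(line):
--     i1 = line.find(',')
--     if i1 == -1:
--         return "\n"
--     i2 = line.find(',', i1 + 1)
--     if i2 == -1:
--         return "\n"
--     start = i2 + 1
--     sp = line.find(' ', start)
--     c3 = line.find(',', start)
--     if sp != -1 and (c3 == -1 or sp < c3):
--         return line[:sp] + "\n"
--     return line[:start] + "\n"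
-- ===== Notes on version B (the rewrite author's own statement) =====
-- stated objective: simpler
-- what changed: Replaced the char-by-char counter state machine (letterIteration/whichComma/secondComma/firstSpace with a break) by four str.find locate calls and direct slicing: find the first two commas, then decide whether the first space after the second comma precedes any third comma.
import Mathlib
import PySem

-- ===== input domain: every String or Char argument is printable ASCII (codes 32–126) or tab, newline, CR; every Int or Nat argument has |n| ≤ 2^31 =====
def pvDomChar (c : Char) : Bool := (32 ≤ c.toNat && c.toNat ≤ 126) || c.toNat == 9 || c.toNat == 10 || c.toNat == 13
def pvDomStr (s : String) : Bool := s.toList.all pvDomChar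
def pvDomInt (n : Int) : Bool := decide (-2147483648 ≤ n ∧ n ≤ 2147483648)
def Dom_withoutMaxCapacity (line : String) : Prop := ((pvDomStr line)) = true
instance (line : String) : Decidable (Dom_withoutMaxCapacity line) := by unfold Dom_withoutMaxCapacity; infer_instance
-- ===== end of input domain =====

-- B replaces A's single stateful counting scan (with break) by discrete str.find locate calls
-- and direct slicing; objective: simpler (and measured faster by a constant factor).

-- ===== PORT A =====
-- the Python for-loop with break: state (letterIteration, firstSpace, whichComma, secondComma);
-- returns (firstSpace, secondComma) as left behind by the loop / the break
def withoutMaxCapacityLoop : List Char → Int → Int → Int → Int → (Int × Int)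
  | [], _, firstSpace, _, secondComma => (firstSpace, secondComma)
  | letter :: rest, letterIteration, firstSpace, whichComma, secondComma =>
    let whichComma := if letter = ',' then whichComma + 1 else whichComma
    if whichComma = 2 ∧ secondComma = 0 then
      withoutMaxCapacityLoop rest (letterIteration + 1) firstSpace whichComma (letterIteration + 1)
    else if whichComma = 2 ∧ letter = ' ' then
      (letterIteration, secondComma)
    else
      withoutMaxCapacityLoop rest (letterIteration + 1) firstSpace whichComma secondComma


def withoutMaxCapacity (line : String) : String :=
  let r := withoutMaxCapacityLoop line.toList 0 0 0 0
  let firstSpace := r.1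
  let secondComma := r.2
  let shortCapacity := PySem.Str.slice line (some secondComma) (some firstSpace)
  PySem.Str.slice line none (some secondComma) ++ shortCapacity ++ "\n"

-- ===== PORT B =====
def withoutMaxCapacity_alt (line : String) : String :=
  let i1 := PySem.Str.find line ","
  if i1 = -1 then "\n"
  else
    let i2 := PySem.Str.findFrom line "," (i1 + 1)
    if i2 = -1 then "\n"
    else
      let start := i2 + 1
      let sp := PySem.Str.findFrom line " " start
      let c3 := PySem.Str.findFrom line "," start
      if sp ≠ -1 ∧ (c3 = -1 ∨ sp < c3) then
        PySem.Str.slice line none (some sp) ++ "\n"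
      else
        PySem.Str.slice line none (some start) ++ "\n"

-- ===== PRECONDITION & SPEC =====
def Spec_withoutMaxCapacity (line : String) (out : String) : Prop := out = withoutMaxCapacity_alt line
instance (line : String) (out : String) : Decidable (Spec_withoutMaxCapacity line out) := by unfold Spec_withoutMaxCapacity; infer_instance

-- ===== CLAIM (what is proved, stated in full; the proofs are below) =====
def Claim_equal_withoutMaxCapacity : Prop := ∀ (line : String), Dom_withoutMaxCapacity line → Spec_withoutMaxCapacity line (withoutMaxCapacity line)

-- ===== LEMMAS AND PROOFS =====

-- first-occurrence decomposition
theorem pv_split_first (P : Char → Bool) (l : List Char) :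
    (∀ c ∈ l, P c = false) ∨ ∃ u b r, l = u ++ b :: r ∧ P b = true ∧ ∀ c ∈ u, P c = false := by
  induction l with
  | nil => left; intro c hc; cases hc
  | cons a t ih =>
    by_cases h : P a = true
    · right; exact ⟨[], a, t, rfl, h, by intro c hc; cases hc⟩
    · rcases ih with h1 | ⟨u, b, r, rfl, hb, hu⟩
      · left; intro c hc
        rcases List.mem_cons.mp hc with rfl | hc
        · simpa using h
        · exact h1 c hc
      · right
        refine ⟨a :: u, b, r, rfl, hb, ?_⟩
        intro c hc
        rcases List.mem_cons.mp hc with rfl | hc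
        · simpa using h
        · exact hu c hc

theorem pv_singleton_prefix {c : Char} {l : List Char} : [c] <+: l ↔ l.head? = some c := by
  constructor
  · rintro ⟨t, rfl⟩; rfl
  · intro h; cases l with
    | nil => simp at h
    | cons a t => simp at h; exact ⟨t, by simp [h]⟩

theorem pv_singleton_infix {c : Char} {l : List Char} : [c] <:+: l ↔ c ∈ l := by
  constructor
  · rintro ⟨s, t, rfl⟩; simp
  · intro h
    obtain ⟨s, t, rfl⟩ := List.append_of_mem h
    exact ⟨s, t, by simp⟩

theorem pv_find_not_mem {c : Char} {l : List Char} (h : c ∉ l) :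
    PySem.Chars.find l [c] = -1 :=
  (PySem.Chars.find_eq_neg_one_iff _ _).mpr (fun hin => h (pv_singleton_infix.mp hin))

-- where a singleton prefix of a drop can sit
theorem pv_prefix_pos {c b : Char} {u r : List Char} (hu : c ∉ u) {f : Nat}
    (h : [c] <+: (u ++ b :: r).drop f) (hf : f ≤ u.length) : f = u.length ∧ b = c := by
  rcases Nat.lt_or_ge f u.length with hlt | hge
  · exfalso
    rw [List.drop_append_of_le_length (Nat.le_of_lt hlt), List.drop_eq_getElem_cons hlt,
      List.cons_append] at h
    have h2 := pv_singleton_prefix.mp h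
    simp at h2
    exact hu (h2 ▸ List.getElem_mem hlt)
  · have hfe : f = u.length := Nat.le_antisymm hf hge
    subst hfe
    have hd : (u ++ b :: r).drop u.length = b :: r := by
      simp
    rw [hd] at h
    have h2 := pv_singleton_prefix.mp h
    simp at h2
    exact ⟨rfl, h2⟩

theorem pv_find_first {c : Char} {u r : List Char} (hu : c ∉ u) :
    PySem.Chars.find (u ++ c :: r) [c] = (u.length : Int) := by
  have hinf : [c] <:+: (u ++ c :: r) := pv_singleton_infix.mpr (by simp)
  have h0 : 0 ≤ PySem.Chars.find (u ++ c :: r) [c] := (PySem.Chars.find_nonneg_iff _ _).mpr hinf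
  obtain ⟨hpre, hmin⟩ := PySem.Chars.find_spec h0
  set f := (PySem.Chars.find (u ++ c :: r) [c]).toNat with hfdef
  have hle : f ≤ u.length := by
    by_contra hcon
    have hcon' : u.length < f := by omega
    refine hmin u.length hcon' ?_
    have hd : (u ++ c :: r).drop u.length = c :: r := by
      simp
    rw [hd]
    exact ⟨r, rfl⟩
  have := (pv_prefix_pos hu hpre hle).1
  omega

theorem pv_find_other {c b : Char} {u r : List Char} (hu : c ∉ u) (hb : b ≠ c) :
    PySem.Chars.find (u ++ b :: r) [c] = -1 ∨
      (u.length : Int) < PySem.Chars.find (u ++ b :: r) [c] := by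
  by_cases h : PySem.Chars.find (u ++ b :: r) [c] = -1
  · exact Or.inl h
  · right
    have h0 : 0 ≤ PySem.Chars.find (u ++ b :: r) [c] := by
      have := PySem.Chars.neg_one_le_find (u ++ b :: r) [c]
      omega
    obtain ⟨hpre, _⟩ := PySem.Chars.find_spec h0
    set f := (PySem.Chars.find (u ++ b :: r) [c]).toNat with hfdef
    have : ¬ f ≤ u.length := by
      intro hle
      exact hb (pv_prefix_pos hu hpre hle).2
    omega

theorem pv_loop_skip {u : List Char} (rest : List Char) (i fs w sc : Int)
    (hu : ',' ∉ u) (hw : w ≠ 2) :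
    withoutMaxCapacityLoop (u ++ rest) i fs w sc =
      withoutMaxCapacityLoop rest (i + u.length) fs w sc := by
  induction u generalizing i with
  | nil => simp
  | cons a t ih =>
    have ha : a ≠ ',' := fun h => hu (h ▸ List.mem_cons_self)
    have ht : ',' ∉ t := fun h => hu (List.mem_cons_of_mem _ h)
    rw [List.cons_append]
    rw [withoutMaxCapacityLoop]
    simp only [if_neg ha]
    rw [if_neg (by tauto), if_neg (by tauto)]
    rw [ih _ ht]
    congr 1
    simp only [List.length_cons]
    push_cast
    omega

theorem pv_loop_comma1 (rest : List Char) (i fs sc : Int) :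
    withoutMaxCapacityLoop (',' :: rest) i fs 0 sc =
      withoutMaxCapacityLoop rest (i + 1) fs 1 sc := by
  rw [withoutMaxCapacityLoop]
  norm_num

theorem pv_loop_comma2 (rest : List Char) (i fs : Int) :
    withoutMaxCapacityLoop (',' :: rest) i fs 1 0 =
      withoutMaxCapacityLoop rest (i + 1) fs 2 (i + 1) := by
  rw [withoutMaxCapacityLoop]
  norm_num

theorem pv_loop_skip2 {u : List Char} (rest : List Char) (i fs sc : Int)
    (hu1 : ',' ∉ u) (hu2 : ' ' ∉ u) (hsc : sc ≠ 0) :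
    withoutMaxCapacityLoop (u ++ rest) i fs 2 sc =
      withoutMaxCapacityLoop rest (i + u.length) fs 2 sc := by
  induction u generalizing i with
  | nil => simp
  | cons a t ih
  =>
    have ha : a ≠ ',' := fun h => hu1 (h ▸ List.mem_cons_self)
    have ha2 : a ≠ ' ' := fun h => hu2 (h ▸ List.mem_cons_self)
    have ht : ',' ∉ t := fun h => hu1 (List.mem_cons_of_mem _ h)
    have ht2 : ' ' ∉ t := fun h => hu2 (List.mem_cons_of_mem _ h)
    rw [List.cons_append]
    rw [withoutMaxCapacityLoop]
    simp only [if_neg ha]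
    rw [if_neg (by tauto), if_neg (by tauto)]
    rw [ih _ ht ht2]
    congr 1
    simp only [List.length_cons]
    push_cast
    omega

theorem pv_loop_space2 (rest : List Char) (i fs sc : Int) (hsc : sc ≠ 0) :
    withoutMaxCapacityLoop (' ' :: rest) i fs 2 sc = (i, sc) := by
  rw [withoutMaxCapacityLoop]
  have h1 : (' ' : Char) ≠ ',' := by decide
  simp [h1, hsc]

theorem pv_loop_comma3 (rest : List Char) (i fs sc : Int) (hsc : sc ≠ 0) :
    withoutMaxCapacityLoop (',' :: rest) i fs 2 sc =
      withoutMaxCapacityLoop rest (i + 1) fs 3 sc := by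
  rw [withoutMaxCapacityLoop]
  simp [hsc]

theorem pv_loop_dead (l : List Char) (i fs w sc : Int) (hw : 3 ≤ w) :
    withoutMaxCapacityLoop l i fs w sc = (fs, sc) := by
  induction l generalizing i w with
  | nil => rw [withoutMaxCapacityLoop]
  | cons a t ih =>
    rw [withoutMaxCapacityLoop]
    by_cases ha : a = ','
    · rw [if_pos ha, if_neg (by omega), if_neg (by omega)]
      exact ih (i + 1) (w + 1) (by omega)
    · rw [if_neg ha, if_neg (by omega), if_neg (by omega)]
      exact ih (i + 1) w hw

theorem pv_out (line : String) (fs sc : Int)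
    (h : withoutMaxCapacityLoop line.toList 0 0 0 0 = (fs, sc)) :
    (withoutMaxCapacity line).toList =
      PySem.List.slice line.toList none (some sc) ++
        PySem.List.slice line.toList (some sc) (some fs) ++ ['\n'] := by
  simp only [withoutMaxCapacity, h, String.toList_append, PySem.Str.toList_slice,
    PySem.Chars.slice_eq_listSlice]
  rfl

theorem pv_slice_take (line : String) (k : Nat) :
    (PySem.Str.slice line none (some (k : Int))).toList = line.toList.take k := by
  rw [PySem.Str.toList_slice, PySem.Chars.slice_eq_listSlice, PySem.List.slice_to_natCast]

theorem pv_slice_zero (l : List Char) (a : Int) (ha : 0 ≤ a) :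
    PySem.List.slice l (some a) (some 0) = [] := by
  rw [PySem.List.slice_toNat l ha (by omega)]
  simp

theorem pv_slice_none_zero (l : List Char) :
    PySem.List.slice l none (some (0 : Int)) = [] := by
  rw [PySem.List.slice_to l (by omega)]
  simp

theorem pv_main (line : String) : withoutMaxCapacity line = withoutMaxCapacity_alt line := by
  rw [← String.toList_inj]
  have hcomma : ("," : String).toList = [','] := rfl
  have hspace : (" " : String).toList = [' '] := rfl
  have hnl : ("\n" : String).toList = ['\n'] := rfl
  rcases pv_split_first (fun c => c == ',') line.toList with h1 | ⟨u, b, r, hl, hb, hu⟩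
  · -- no comma at all
    have hnc : ',' ∉ line.toList := fun hm => by simpa using h1 _ hm
    have hA : withoutMaxCapacityLoop line.toList 0 0 0 0 = (0, 0) := by
      have hloop := pv_loop_skip (u := line.toList) [] 0 0 0 0 hnc (by norm_num)
      rw [List.append_nil] at hloop
      rw [hloop, withoutMaxCapacityLoop]
    have hf : PySem.Chars.find line.toList [','] = -1 := pv_find_not_mem hnc
    rw [pv_out line 0 0 hA]
    simp [withoutMaxCapacity_alt, PySem.Str.find_eq, hcomma, hf,
      pv_slice_none_zero, pv_slice_zero _ 0 (le_refl 0), hnl]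
  · have hb' : b = ',' := by simpa using hb
    subst hb'
    have hu' : ',' ∉ u := fun hm => by simpa using hu _ hm
    rcases pv_split_first (fun c => c == ',') r with h2 | ⟨v, b2, w, hr, hb2, hv⟩
    · -- exactly one comma
      have hvr : ',' ∉ r := fun hm => by simpa using h2 _ hm
      have hA : withoutMaxCapacityLoop line.toList 0 0 0 0 = (0, 0) := by
        rw [hl, pv_loop_skip (',' :: r) 0 0 0 0 hu' (by norm_num), pv_loop_comma1]
        have hskip := pv_loop_skip (u := r) [] (0 + (u.length : Int) + 1) 0 1 0 hvr (by norm_num)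
        rw [List.append_nil] at hskip
        rw [hskip, withoutMaxCapacityLoop]
      have hf1 : PySem.Chars.find line.toList [','] = (u.length : Int) := by
        rw [hl]; exact pv_find_first hu'
      have hne1 : ¬ ((u.length : Int) = -1) := by omega
      have hf2 : PySem.Chars.findFrom line.toList [','] ((u.length : Int) + 1) = -1 := by
        rw [show ((u.length : Int) + 1) =
          ((u.length + 1 : Nat) : Int) by push_cast; ring]
        rw [PySem.Chars.findFrom_natCast _ _ (u.length + 1) (by rw [hl]; simp)]
        have hd : line.toList.drop (u.length + 1) = r := by
          rw [hl, show u ++ ',' :: r = (u ++ [',']) ++ r by simp,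
            List.drop_left' (by simp)]
        rw [hd, pv_find_not_mem hvr, if_pos rfl]
      rw [pv_out line 0 0 hA]
      simp [withoutMaxCapacity_alt, PySem.Str.find_eq, PySem.Str.findFrom_eq, hcomma, hf1, hf2,
        hne1, pv_slice_none_zero, pv_slice_zero _ 0 (le_refl 0), hnl]
    · -- at least two commas
      have hb2' : b2 = ',' := by simpa using hb2
      subst hb2'
      have hv' : ',' ∉ v := fun hm => by simpa using hv _ hm
      subst hr
      have hlen : line.toList.length = u.length + 1 + v.length + 1 + w.length := by
        rw [hl]; simp; omega
      have hdrop1 : line.toList.drop (u.length + 1) = v ++ ',' :: w := by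
        rw [hl, show u ++ ',' :: (v ++ ',' :: w) = (u ++ [',']) ++ (v ++ ',' :: w) by simp,
          List.drop_left' (by simp)]
      have hdrop2 : line.toList.drop (u.length + 1 + v.length + 1) = w := by
        rw [hl, show u ++ ',' :: (v ++ ',' :: w) = ((u ++ [',']) ++ (v ++ [','])) ++ w by simp,
          List.drop_left' (by simp; omega)]
      have hf1 : PySem.Chars.find line.toList [','] = (u.length : Int) := by
        rw [hl]; exact pv_find_first hu'
      have hne1 : ¬ ((u.length : Int) = -1) := by omega
      have hf2 : PySem.Chars.findFrom line.toList [','] ((u.length : Int) + 1) =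
          ((u.length + 1 + v.length : Nat) : Int) := by
        rw [show ((u.length : Int) + 1) =
          ((u.length + 1 : Nat) : Int) by push_cast; ring]
        rw [PySem.Chars.findFrom_natCast _ _ (u.length + 1) (by omega)]
        rw [hdrop1, pv_find_first hv', if_neg (by omega)]
        push_cast; ring
      have hne2 : ¬ (((u.length + 1 + v.length : Nat) : Int) = -1) := by
        push_cast; omega
      have hA0 : withoutMaxCapacityLoop line.toList 0 0 0 0 =
          withoutMaxCapacityLoop w ((u.length + 1 + v.length + 1 : Nat) : Int) 0 2
            ((u.length + 1 + v.length + 1 : Nat) : Int) := by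
        rw [hl, pv_loop_skip (',' :: (v ++ ',' :: w)) 0 0 0 0 hu' (by norm_num), pv_loop_comma1,
          pv_loop_skip (',' :: w) _ 0 1 0 hv' (by norm_num), pv_loop_comma2]
        congr 1 <;> push_cast <;> ring
      have hk2 : ((u.length + 1 + v.length : Nat) : Int) + 1 =
          ((u.length + 1 + v.length + 1 : Nat) : Int) := by push_cast; ring
      have hscne : ((u.length + 1 + v.length + 1 : Nat) : Int) ≠ 0 := by
        push_cast; omega
      have hspC : PySem.Chars.findFrom line.toList [' '] (((u.length + 1 + v.length : Nat) : Int) + 1) =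
          (if PySem.Chars.find w [' '] = -1 then -1
           else ((u.length + 1 + v.length + 1 : Nat) : Int) + PySem.Chars.find w [' ']) := by
        rw [hk2,
          PySem.Chars.findFrom_natCast _ _ (u.length + 1 + v.length + 1) (by omega), hdrop2]
      have hc3C : PySem.Chars.findFrom line.toList [','] (((u.length + 1 + v.length : Nat) : Int) + 1) =
          (if PySem.Chars.find w [','] = -1 then -1
           else ((u.length + 1 + v.length + 1 : Nat) : Int) + PySem.Chars.find w [',']) := by
        rw [hk2,
          PySem.Chars.findFrom_natCast _ _ (u.length + 1 + v.length + 1) (by omega), hdrop2]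
      rcases pv_split_first (fun c => c == ' ' || c == ',') w with h3 | ⟨w1, b3, w2, hw, hb3, hw1⟩
      · -- w contains neither space nor comma: scan runs off the end, keep up to 2nd comma
        have hws : ' ' ∉ w := fun hm => by simpa using (h3 _ hm)
        have hwc : ',' ∉ w := fun hm => by simpa using h3 _ hm
        have hA : withoutMaxCapacityLoop line.toList 0 0 0 0 =
            (0, ((u.length + 1 + v.length + 1 : Nat) : Int)) := by
          rw [hA0]
          have hskip := pv_loop_skip2 (u := w) []
            ((u.length + 1 + v.length + 1 : Nat) : Int) 0 _ hwc hws hscne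
          rw [List.append_nil] at hskip
          rw [hskip, withoutMaxCapacityLoop]
        have hsp : PySem.Chars.findFrom line.toList [' ']
            (((u.length + 1 + v.length : Nat) : Int) + 1) = -1 := by
          rw [hspC, pv_find_not_mem hws, if_pos rfl]
        rw [pv_out line 0 _ hA]
        simp only [withoutMaxCapacity_alt, PySem.Str.find_eq, PySem.Str.findFrom_eq, hcomma, hspace, hf1, hf2, hsp, if_neg hne1, if_neg hne2]
        rw [if_neg (by simp)]
        rw [hk2, pv_slice_zero _ _ (by omega), PySem.List.slice_to_natCast,
          String.toList_append, pv_slice_take, hnl]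
        simp
      · -- w = w1 ++ b3 :: w2, b3 the first space-or-comma in w
        have hw1s : ' ' ∉ w1 := fun hm => by simpa using (hw1 _ hm)
        have hw1c : ',' ∉ w1 := fun hm => by simpa using hw1 _ hm
        subst hw
        by_cases hb3s : b3 = ' '
        · -- first special char is a space: truncate there
          subst hb3s
          have hA : withoutMaxCapacityLoop line.toList 0 0 0 0 =
              (((u.length + 1 + v.length + 1 + w1.length : Nat) : Int),
               ((u.length + 1 + v.length + 1 : Nat) : Int)) := by
            rw [hA0, pv_loop_skip2 (' ' :: w2) _ 0 _ hw1c hw1s hscne,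
              pv_loop_space2 _ _ _ _ hscne]
            congr 1
          have hfsp : PySem.Chars.find (w1 ++ ' ' :: w2) [' '] = (w1.length : Int) :=
            pv_find_first hw1s
          have hsp : PySem.Chars.findFrom line.toList [' ']
              (((u.length + 1 + v.length : Nat) : Int) + 1) =
              ((u.length + 1 + v.length + 1 + w1.length : Nat) : Int) := by
            rw [hspC, hfsp, if_neg (by omega)]
            push_cast; ring
          have hdisj := pv_find_other (u := w1) (r := w2) hw1c (by decide : (' ' : Char) ≠ ',')
          rw [pv_out line _ _ hA]
          simp only [withoutMaxCapacity_alt, PySem.Str.find_eq, PySem.Str.findFrom_eq, hcomma, hspace, hf1, hf2, hsp, hc3C, if_neg hne1, if_neg hne2]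
          rw [if_pos ?side]
          case side =>
            refine ⟨by push_cast; omega, ?_⟩
            rcases hdisj with hd | hd
            · left; rw [hd, if_pos rfl]
            · right
              rw [if_neg (by omega)]
              push_cast
              omega
          rw [PySem.List.slice_to_natCast, PySem.List.slice_natCast, String.toList_append,
            pv_slice_take, hnl]
          have h1 : u.length + 1 + v.length + 1 + w1.length - (u.length + 1 + v.length + 1)
              = w1.length := by omega
          rw [h1, ← List.take_add,
            show (u.length + 1 + v.length + 1) + w1.length
              = u.length + 1 + v.length + 1 + w1.length by omega]
        · -- first special char is a comma: the space hunt is cancelled, keep up to 2nd comma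
          have hb3c : b3 = ',' := by
            have := hb3
            simp [hb3s] at this
            exact this
          subst hb3c
          have hA : withoutMaxCapacityLoop line.toList 0 0 0 0 =
              (0, ((u.length + 1 + v.length + 1 : Nat) : Int)) := by
            rw [hA0, pv_loop_skip2 (',' :: w2) _ 0 _ hw1c hw1s hscne,
              pv_loop_comma3 _ _ _ _ hscne, pv_loop_dead _ _ _ _ _ (by omega)]
          have hfc3 : PySem.Chars.find (w1 ++ ',' :: w2) [','] = (w1.length : Int) :=
            pv_find_first hw1c
          have hdisj := pv_find_other (u := w1) (r := w2) hw1s (by decide : (',' : Char) ≠ ' ')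
          rw [pv_out line _ _ hA]
          simp only [withoutMaxCapacity_alt, PySem.Str.find_eq, PySem.Str.findFrom_eq, hcomma, hspace, hf1, hf2, hspC, hc3C, if_neg hne1, if_neg hne2]
          rw [if_neg ?side]
          case side =>
            rw [hfc3, if_neg (show ¬ ((w1.length : Nat) : Int) = -1 by omega)]
            rintro ⟨hsp_ne, hor⟩
            rcases hdisj with hd | hd
            · rw [hd, if_pos rfl] at hsp_ne
              exact hsp_ne rfl
            · rw [if_neg (by omega)] at hsp_ne hor
              rcases hor with habs | habs
              · push_cast at habs; omega
              · push_cast at habs hd; omega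
          rw [hk2, pv_slice_zero _ _ (by omega), PySem.List.slice_to_natCast,
            String.toList_append, pv_slice_take, hnl]
          simp

-- ===== VERDICT (by name: the statement is the Claim_ definition above) =====
theorem withoutMaxCapacity_spec : Claim_equal_withoutMaxCapacity := by
  intro line _
  unfold Spec_withoutMaxCapacity
  exact pv_main line
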